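-- pv_equiv track=rewrite | github.com/JeangyuHeo/Algorithm | 연습문제/practice3.py | solution
-- ===== SOURCE A (Python) =====
-- from itertools import combinations
--
-- def calc_avg(arr):
--     return sum(arr) // len(arr)
--
-- def solution(prices, d, k):
--     cases = []
--     length = len(prices)
--     prices.sort()
--
--     #case1
--     if prices[-1] - prices[0] <= d:
--         return calc_avg(prices)
--
--     #case2
--     if prices[-2] - prices[1] <= d:
--         return calc_avg(prices[1:-1])
--
--     #case3
--     for comb in combinations(prices, k):
--         tmp = sorted(list(comb))
--         if tmp not in cases:
--             cases.append(tmp)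
--
--     min_val = 1e9
--
--     for case in cases:
--         if case[-1] - case[0] <= d:
--             min_val = min(min_val, calc_avg(case))
--     if min_val != 1e9:
--         return min_val
--
--     #case4
--     if length % 2 ==0:
--         return prices[(length // 2) - 1]
--     else:
--         return prices[length // 2]
-- ===== SOURCE B (Python) =====
-- def solution(prices, d, k):
--     prices.sort()
--     n = len(prices)
--     if prices[-1] - prices[0] <= d:
--         return sum(prices) // n
--     if prices[-2] - prices[1] <= d:
--         return sum(prices[1:-1]) // (n - 2)
--     INF = 10 ** 9
--     best = INF
--     for i in range(n - k + 1):
--         if prices[i + k - 1] - prices[i] <= d: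
--             best = min(best, sum(prices[i:i + k]) // k)
--     if best != INF:
--         return best
--     if n % 2 == 0:
--         return prices[n // 2 - 1]
--     return prices[n // 2]
-- ===== Notes on version B (the rewrite author's own statement) =====
-- stated objective: faster
-- what changed: Replaced the enumeration of all C(n,k) combinations (with a quadratic list-dedup pass) by a single scan over the n-k+1 windows of k consecutive elements of the sorted list, which is exact because for any in-range combination the window starting at its minimum has a smaller or equal sum and a smaller or equal range.
import Mathlib
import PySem

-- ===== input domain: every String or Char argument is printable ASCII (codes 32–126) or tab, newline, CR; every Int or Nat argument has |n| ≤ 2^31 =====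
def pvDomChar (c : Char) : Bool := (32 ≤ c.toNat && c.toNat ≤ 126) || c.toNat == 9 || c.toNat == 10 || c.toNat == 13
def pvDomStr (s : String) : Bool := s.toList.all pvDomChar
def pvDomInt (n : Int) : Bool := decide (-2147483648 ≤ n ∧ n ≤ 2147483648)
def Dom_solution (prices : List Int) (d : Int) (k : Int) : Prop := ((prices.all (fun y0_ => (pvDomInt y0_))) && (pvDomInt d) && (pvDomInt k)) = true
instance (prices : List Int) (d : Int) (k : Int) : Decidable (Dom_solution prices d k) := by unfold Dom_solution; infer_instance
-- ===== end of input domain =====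

-- B replaces A's enumeration of all C(n,k) combinations by one scan over the k-wide windows of
-- the sorted list (exact: the window starting at a combination's minimum has smaller-or-equal sum
-- and range); objective: faster. Both Pythons sort `prices` in place (identical mutation); the
-- equivalence proved here is about the return value.

-- ===== PORT A =====
def pvCalcAvg (arr : List Int) : Int := PySem.Int.floordiv arr.sum arr.length

-- itertools.combinations(xs, K) of a list, in itertools' lexicographic-by-index order
def pvCombos : List Int → Nat → List (List Int)
  | _, 0 => [[]]
  | [], _ + 1 => []
  | x :: xs, j + 1 => ((pvCombos xs j).map (fun c => x :: c)) ++ pvCombos xs (j + 1)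

def solution (prices : List Int) (d : Int) (k : Int) : Int :=
  let length : Int := prices.length
  let s := PySem.List.sorted prices (fun y => y) false
  if PySem.List.pyGetD s (-1) 0 - PySem.List.pyGetD s 0 0 ≤ d then
    pvCalcAvg s
  else if PySem.List.pyGetD s (-2) 0 - PySem.List.pyGetD s 1 0 ≤ d then
    pvCalcAvg (PySem.List.slice s (some 1) (some (-1)))
  else
    -- k < 0 raises ValueError in Python (excluded by Pre_); k.toNat is only reached with 1 ≤ k
    let cases := (pvCombos s k.toNat).foldl
      (fun cs c =>
        if cs.contains (PySem.List.sorted c (fun y => y) false) then cs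
        else cs ++ [PySem.List.sorted c (fun y => y) false]) []
    let min_val := cases.foldl
      (fun m c => if PySem.List.pyGetD c (-1) 0 - PySem.List.pyGetD c 0 0 ≤ d
                  then min m (pvCalcAvg c) else m) 1000000000
    if min_val ≠ 1000000000 then min_val
    else if PySem.Int.mod length 2 = 0 then
      PySem.List.pyGetD s (PySem.Int.floordiv length 2 - 1) 0
    else
      PySem.List.pyGetD s (PySem.Int.floordiv length 2) 0

-- ===== PORT B =====
def solution_alt (prices : List Int) (d : Int) (k : Int) : Int :=
  let n : Int := prices.length
  let s := PySem.List.sorted prices (fun y => y) false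
  if PySem.List.pyGetD s (-1) 0 - PySem.List.pyGetD s 0 0 ≤ d then
    PySem.Int.floordiv s.sum n
  else if PySem.List.pyGetD s (-2) 0 - PySem.List.pyGetD s 1 0 ≤ d then
    PySem.Int.floordiv (PySem.List.slice s (some 1) (some (-1))).sum (n - 2)
  else
    let best := (PySem.List.pyRange 0 (n - k + 1) 1).foldl
      (fun m i => if PySem.List.pyGetD s (i + k - 1) 0 - PySem.List.pyGetD s i 0 ≤ d
                  then min m (PySem.Int.floordiv (PySem.List.slice s (some i) (some (i + k))).sum k)
                  else m) 1000000000
    if best ≠ 1000000000 then best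
    else if PySem.Int.mod n 2 = 0 then
      PySem.List.pyGetD s (PySem.Int.floordiv n 2 - 1) 0
    else
      PySem.List.pyGetD s (PySem.Int.floordiv n 2) 0

-- ===== PRECONDITION & SPEC =====
-- Pre_ is exactly the set of inputs on which the Python A returns normally: it excludes the empty
-- list (IndexError), a 1-element list with d < 0 (IndexError at case2), a 2-element list on which
-- case2 fires (ZeroDivisionError), and k ≤ 0 when case3 is reached (ValueError/IndexError).
def Pre_solution (prices : List Int) (d : Int) (k : Int) : Prop :=
  let s := PySem.List.sorted prices (fun y => y) false
  0 < prices.length ∧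
  (¬ (PySem.List.pyGetD s (-1) 0 - PySem.List.pyGetD s 0 0 ≤ d) →
    2 ≤ prices.length ∧
    ((PySem.List.pyGetD s (-2) 0 - PySem.List.pyGetD s 1 0 ≤ d) → 3 ≤ prices.length) ∧
    (¬ (PySem.List.pyGetD s (-2) 0 - PySem.List.pyGetD s 1 0 ≤ d) → 1 ≤ k))
instance (prices : List Int) (d : Int) (k : Int) : Decidable (Pre_solution prices d k) := by
  unfold Pre_solution; infer_instance

def pvWitness_solution : List Int × Int × Int := ([9, 1, 5], 0, 2)

def Spec_solution (prices : List Int) (d : Int) (k : Int) (out : Int) : Prop := out = solution_alt prices d k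
instance (prices : List Int) (d : Int) (k : Int) (out : Int) : Decidable (Spec_solution prices d k out) := by unfold Spec_solution; infer_instance

-- ===== CLAIM (what is proved, stated in full; the proofs are below) =====
def Claim_equal_solution : Prop := ∀ (prices : List Int) (d : Int) (k : Int), Dom_solution prices d k → Pre_solution prices d k → Spec_solution prices d k (solution prices d k)

-- ===== LEMMAS AND PROOFS =====

theorem foldl_min_le_init : ∀ (l : List Int) (a : Int), l.foldl min a ≤ a := by
  intro l
  induction l with
  | nil => intro a; simp
  | cons y t ih =>
    intro a
    simp only [List.foldl_cons]
    exact le_trans (ih (min a y)) (min_le_left a y)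

theorem foldl_min_le_mem : ∀ (l : List Int) (a x : Int), x ∈ l → l.foldl min a ≤ x := by
  intro l
  induction l with
  | nil => intro a x h; simp at h
  | cons y t ih =>
    intro a x h
    simp only [List.foldl_cons]
    rcases List.mem_cons.mp h with rfl | h'
    · exact le_trans (foldl_min_le_init t _) (min_le_right a x)
    · exact ih _ _ h'

theorem foldl_min_cases : ∀ (l : List Int) (a : Int), l.foldl min a = a ∨ l.foldl min a ∈ l := by
  intro l
  induction l with
  | nil => intro a; exact Or.inl rfl
  | cons y t ih =>
    intro a
    simp only [List.foldl_cons]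
    rcases ih (min a y) with h | h
    · rcases min_choice a y with h' | h'
      · exact Or.inl (h.trans h')
      · exact Or.inr (by rw [h, h']; exact List.mem_cons_self ..)
    · exact Or.inr (List.mem_cons_of_mem _ h)

theorem foldl_min_dom (l₁ l₂ : List Int) (a : Int)
    (h₁ : ∀ x ∈ l₁, ∃ y ∈ l₂, y ≤ x) (h₂ : ∀ y ∈ l₂, ∃ x ∈ l₁, x ≤ y) :
    l₁.foldl min a = l₂.foldl min a := by
  apply le_antisymm
  · rcases foldl_min_cases l₂ a with h | h
    · rw [h]; exact foldl_min_le_init _ _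
    · obtain ⟨x, hx, hle⟩ := h₂ _ h
      exact le_trans (foldl_min_le_mem _ _ _ hx) hle
  · rcases foldl_min_cases l₁ a with h | h
    · rw [h]; exact foldl_min_le_init _ _
    · obtain ⟨y, hy, hle⟩ := h₁ _ h
      exact le_trans (foldl_min_le_mem _ _ _ hy) hle

theorem foldl_ite_min {α : Type} (P : α → Prop) [DecidablePred P] (f : α → Int) :
    ∀ (l : List α) (a : Int),
      l.foldl (fun m c => if P c then min m (f c) else m) a
        = ((l.filter (fun c => decide (P c))).map f).foldl min a := by
  intro l
  induction l with
  | nil => intro a; rfl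
  | cons c t ih =>
    intro a
    by_cases h : P c
    · simp [h, ih]
    · simp [h, ih]

theorem mem_pvCombos : ∀ (s : List Int) (K : Nat) (c : List Int),
    c ∈ pvCombos s K ↔ c.Sublist s ∧ c.length = K := by
  intro s
  induction s with
  | nil =>
    intro K c
    cases K with
    | zero =>
      simp only [pvCombos, List.mem_singleton, List.sublist_nil]
      constructor
      · rintro rfl; exact ⟨rfl, rfl⟩
      · rintro ⟨h, _⟩; exact h
    | succ j =>
      simp only [pvCombos, List.not_mem_nil, false_iff, not_and]
      intro hs
      rw [List.sublist_nil] at hs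
      subst hs
      simp
  | cons x xs ih =>
    intro K c
    cases K with
    | zero =>
      simp only [pvCombos, List.mem_singleton]
      constructor
      · rintro rfl; exact ⟨List.nil_sublist _, rfl⟩
      · rintro ⟨_, hl⟩
        cases c with
        | nil => rfl
        | cons a t => simp at hl
    | succ j =>
      simp only [pvCombos, List.mem_append, List.mem_map]
      constructor
      · rintro (⟨c', hc', rfl⟩ | hc)
        · obtain ⟨h1, h2⟩ := (ih j c').mp hc'
          exact ⟨List.Sublist.cons₂ x h1, by simp [h2]⟩
        · obtain ⟨h1, h2⟩ := (ih (j+1) c).mp hc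
          exact ⟨List.Sublist.cons x h1, h2⟩
      · rintro ⟨hs, hl⟩
        rcases List.sublist_cons_iff.mp hs with h' | ⟨r, rfl, hr⟩
        · exact Or.inr ((ih (j+1) c).mpr ⟨h', hl⟩)
        · exact Or.inl ⟨r, (ih j r).mpr ⟨hr, by simpa using hl⟩, rfl⟩

theorem mem_dedup_fold : ∀ (L acc : List (List Int)) (x : List Int),
    x ∈ L.foldl (fun cs c =>
        if cs.contains (PySem.List.sorted c (fun y => y) false) then cs
        else cs ++ [PySem.List.sorted c (fun y => y) false]) acc
      ↔ x ∈ acc ∨ ∃ c ∈ L, x = PySem.List.sorted c (fun y => y) false := by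
  intro L
  induction L with
  | nil => intro acc x; simp
  | cons c t ih =>
    intro acc x
    simp only [List.foldl_cons]
    by_cases hc : acc.contains (PySem.List.sorted c (fun y => y) false)
    · rw [if_pos hc, ih]
      have hmem : PySem.List.sorted c (fun y => y) false ∈ acc := List.contains_iff_mem.mp hc
      constructor
      · rintro (h | ⟨c', hcm, rfl⟩)
        · exact Or.inl h
        · exact Or.inr ⟨c', List.mem_cons_of_mem _ hcm, rfl⟩
      · rintro (h | ⟨c', hcm, rfl⟩)
        · exact Or.inl h
        · rcases List.mem_cons.mp hcm with rfl | hcm'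
          · exact Or.inl hmem
          · exact Or.inr ⟨c', hcm', rfl⟩
    · rw [if_neg hc, ih]
      constructor
      · rintro (h | ⟨c', hcm, rfl⟩)
        · rcases List.mem_append.mp h with h' | h'
          · exact Or.inl h'
          · exact Or.inr ⟨c, List.mem_cons_self .., by simpa using h'⟩
        · exact Or.inr ⟨c', List.mem_cons_of_mem _ hcm, rfl⟩
      · rintro (h | ⟨c', hcm, rfl⟩)
        · exact Or.inl (List.mem_append.mpr (Or.inl h))
        · rcases List.mem_cons.mp hcm with rfl | hcm'
          · exact Or.inl (List.mem_append.mpr (Or.inr (by simp)))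
          · exact Or.inr ⟨c', hcm', rfl⟩

theorem sublist_getElem_ge : ∀ {v s : List Int}, v.Sublist s →
    s.Pairwise (· ≤ ·) → ∀ (u : Nat) (hu : u < v.length) (hu' : u < s.length),
      s[u]'(hu') ≤ v[u]'(hu) := by
  intro v s h
  induction h with
  | slnil => intro _ u hu _; simp at hu
  | @cons l₁ l₂ a h ih =>
    intro hp u hu hu'
    have hp2 : l₂.Pairwise (· ≤ ·) := (List.pairwise_cons.mp hp).2
    have hu2 : u < l₂.length := lt_of_lt_of_le hu h.length_le
    have h2 := ih hp2 u hu hu2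
    have hstep : (a :: l₂)[u]'hu' ≤ l₂[u]'hu2 := by
      cases u with
      | zero => simpa using (List.pairwise_cons.mp hp).1 (l₂[0]'hu2) (List.getElem_mem hu2)
      | succ v =>
        simp only [List.getElem_cons_succ]
        exact List.pairwise_iff_getElem.mp hp2 v (v+1) (by omega) hu2 (by omega)
    exact le_trans hstep h2
  | @cons₂ l₁ l₂ a h ih =>
    intro hp u hu hu'
    cases u with
    | zero => simp
    | succ v =>
      simp only [List.getElem_cons_succ]
      exact ih (List.pairwise_cons.mp hp).2 v (by simpa using hu) (by simpa using hu')

theorem sublist_head_embed : ∀ (s : List Int) (x : Int) (c' : List Int),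
    (x :: c').Sublist s →
    ∃ j, ∃ (hj : j < s.length), s[j] = x ∧ c'.Sublist (s.drop (j+1)) := by
  intro s
  induction s with
  | nil => intro x c' h; simp at h
  | cons y t ih =>
    intro x c' h
    rcases List.sublist_cons_iff.mp h with h' | ⟨r, hr, hrs⟩
    · obtain ⟨j, hj, he, hd⟩ := ih x c' h'
      exact ⟨j+1, by simpa using hj, by simpa using he, by simpa using hd⟩
    · obtain ⟨rfl, rfl⟩ : y = x ∧ c' = r := by
        have := hr
        injection this with h1 h2
        exact ⟨h1.symm, h2⟩
      exact ⟨0, by simp, by simp, by simpa using hrs⟩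

theorem sum_le_sum_getElem : ∀ (w q : List Int), w.length = q.length →
    (∀ (u : Nat) (hu : u < w.length) (hu' : u < q.length), w[u]'(hu) ≤ q[u]'(hu')) →
      w.sum ≤ q.sum := by
  intro w
  induction w with
  | nil =>
    intro q h _
    cases q with
    | nil => simp
    | cons b c' => simp at h
  | cons a w ih =>
    intro q h hp
    cases q with
    | nil => simp at h
    | cons b c' =>
      simp only [List.sum_cons]
      have h0 : a ≤ b := by simpa using hp 0 (by simp) (by simp)
      have ht : w.sum ≤ c'.sum := by
        apply ih c' (by simpa using h)
        intro u hu hu'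
        have := hp (u+1) (by simpa using Nat.succ_lt_succ hu) (by simpa using Nat.succ_lt_succ hu')
        simpa using this
      exact add_le_add h0 ht

-- the case-3 fold of A (dedup over all combinations, then clamped min of in-range averages)
-- equals the case-3 fold of B (clamped min over the k-wide windows of the sorted list)
theorem fold_combos_eq_windows (s : List Int) (d kI : Int) (hk : 1 ≤ kI)
    (hsp : s.Pairwise (· ≤ ·)) :
    ((pvCombos s kI.toNat).foldl
        (fun cs c =>
          if cs.contains (PySem.List.sorted c (fun y => y) false) then cs
          else cs ++ [PySem.List.sorted c (fun y => y) false]) []).foldl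
      (fun m c =>
        if PySem.List.pyGetD c (-1) 0 - PySem.List.pyGetD c 0 0 ≤ d then min m (pvCalcAvg c) else m)
      1000000000
    = (PySem.List.pyRange 0 ((s.length : Int) - kI + 1) 1).foldl
      (fun m i =>
        if PySem.List.pyGetD s (i + kI - 1) 0 - PySem.List.pyGetD s i 0 ≤ d then
          min m (PySem.Int.floordiv
            (PySem.List.slice s (some i) (some (i + kI))).sum kI)
        else m)
      1000000000 := by
  have hK1 : 1 ≤ kI.toNat := by omega
  have hKI : (kI.toNat : Int) = kI := by omega
  refine .trans
    (foldl_ite_min (fun c => PySem.List.pyGetD c (-1) 0 - PySem.List.pyGetD c 0 0 ≤ d)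
      pvCalcAvg _ _)
    (.trans ?_
      (foldl_ite_min (fun i => PySem.List.pyGetD s (i + kI - 1) 0 - PySem.List.pyGetD s i 0 ≤ d)
        (fun i => PySem.Int.floordiv (PySem.List.slice s (some i) (some (i + kI))).sum kI)
        _ _).symm)
  apply foldl_min_dom
  · -- every deduped in-range combination average is dominated by some window average
    intro x hx
    simp only [List.mem_map, List.mem_filter, decide_eq_true_eq] at hx
    obtain ⟨c, ⟨hcC, hpa⟩, rfl⟩ := hx
    rcases (mem_dedup_fold _ [] c).mp hcC with h | ⟨c₀, hc₀, rfl⟩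
    · simp at h
    obtain ⟨hsub, hlenc⟩ := (mem_pvCombos s kI.toNat c₀).mp hc₀
    have hpc : c₀.Pairwise (· ≤ ·) := List.Pairwise.sublist hsub hsp
    have hcs : PySem.List.sorted c₀ (fun y => y) false = c₀ :=
      PySem.List.sorted_eq_self_of_pairwise c₀ (fun y => y) hpc
    rw [hcs] at hpa ⊢
    obtain ⟨c0, ct, rfl⟩ : ∃ a t, c₀ = a :: t := by
      cases c₀ with
      | nil => simp at hlenc; omega
      | cons a t => exact ⟨a, t, rfl⟩
    obtain ⟨j, hj, hje, hsubt⟩ := sublist_head_embed s c0 ct hsub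
    have hlt : ct.length = kI.toNat - 1 := by simp at hlenc; omega
    have hjK : j + kI.toNat ≤ s.length := by
      have h1 := hsubt.length_le
      simp at h1
      omega
    have hpoint : ∀ (t : Nat) (ht : t < kI.toNat),
        s[j+t]'(by omega) ≤ (c0 :: ct)[t]'(by simp; omega) := by
      intro t ht
      cases t with
      | zero => simpa using le_of_eq hje
      | succ u =>
        have hdp : (s.drop (j+1)).Pairwise (· ≤ ·) :=
          List.Pairwise.sublist (List.drop_sublist _ _) hsp
        have h1 := sublist_getElem_ge hsubt hdp u (by omega) (by simp; omega)
        simp only [List.getElem_drop] at h1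
        simp only [List.getElem_cons_succ]
        simpa only [show j + 1 + u = j + (u + 1) from by omega] using h1
    have hlast : PySem.List.pyGetD (c0 :: ct) (-1) 0 = (c0 :: ct)[kI.toNat - 1]'(by simp; omega) := by
      rw [PySem.List.pyGetD_neg_one _ _ (by simp : (c0 :: ct) ≠ [])]
      rw [List.getLast_eq_getElem]
      simp only [hlenc]
    have h0 : PySem.List.pyGetD (c0 :: ct) 0 0 = c0 := PySem.List.pyGetD_zero_cons _ _ _
    rw [hlast, h0] at hpa
    refine ⟨PySem.Int.floordiv (PySem.List.slice s (some (j:Int)) (some ((j:Int) + kI))).sum kI,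
      ?_, ?_⟩
    · simp only [List.mem_map, List.mem_filter, decide_eq_true_eq]
      refine ⟨(j:Int), ⟨PySem.List.mem_pyRange_one.mpr ⟨by omega, by omega⟩, ?_⟩, rfl⟩
      have e1 : PySem.List.pyGetD s ((j:Int) + kI - 1) 0
          = s[((j:Int) + kI - 1).toNat]'(by omega) :=
        PySem.List.pyGetD_eq_getElem s 0 (by omega) (by omega)
      have e2 : PySem.List.pyGetD s ((j:Int)) 0 = s[((j:Int)).toNat]'(by omega) :=
        PySem.List.pyGetD_eq_getElem s 0 (by omega) (by omega)
      rw [e1, e2]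
      simp only [show ((j:Int) + kI - 1).toNat = j + (kI.toNat - 1) from by omega,
        show ((j:Int)).toNat = j from by omega]
      have hp1 := hpoint (kI.toNat - 1) (by omega)
      rw [hje]
      omega
    · have hsl : PySem.List.slice s (some (j:Int)) (some ((j:Int) + kI))
          = (s.drop j).take kI.toNat := by
        rw [show (j:Int) + kI = ((j + kI.toNat : Nat) : Int) from by push_cast; omega]
        rw [PySem.List.slice_natCast]
        congr 1
        omega
      rw [hsl]
      unfold pvCalcAvg
      have hwl : ((s.drop j).take kI.toNat).length = kI.toNat := by
        simp [List.length_take]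
        omega
      have hsum : ((s.drop j).take kI.toNat).sum ≤ (c0 :: ct).sum := by
        apply sum_le_sum_getElem _ _ (by rw [hwl, hlenc])
        intro u hu hu'
        rw [hwl] at hu
        have h1 := hpoint u hu
        have h2 : ((s.drop j).take kI.toNat)[u]'(by rw [hwl]; exact hu) = s[j+u]'(by omega) := by
          simp only [List.getElem_take, List.getElem_drop]
        rw [h2]
        exact h1
      have hdiv : (((c0 :: ct).length : Nat) : Int) = kI := by rw [hlenc]; exact hKI
      rw [hdiv]
      rw [PySem.Int.floordiv_eq_ediv_of_pos (by omega), PySem.Int.floordiv_eq_ediv_of_pos (by omega)]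
      exact Int.ediv_le_ediv (by omega) hsum
  · -- every window average occurs among the deduped combination averages
    intro y hy
    simp only [List.mem_map, List.mem_filter, decide_eq_true_eq] at hy
    obtain ⟨i, ⟨hiR, hpb⟩, rfl⟩ := hy
    obtain ⟨hi0, hiU⟩ := PySem.List.mem_pyRange_one.mp hiR
    have hij : ((i.toNat : Nat) : Int) = i := by omega
    have hjK : i.toNat + kI.toNat ≤ s.length := by omega
    have hwsub : ((s.drop i.toNat).take kI.toNat).Sublist s :=
      (List.take_sublist _ _).trans (List.drop_sublist _ _)
    have hwl : ((s.drop i.toNat).take kI.toNat).length = kI.toNat := by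
      simp [List.length_take]
      omega
    have hwmem : ((s.drop i.toNat).take kI.toNat) ∈ pvCombos s kI.toNat :=
      (mem_pvCombos s kI.toNat _).mpr ⟨hwsub, hwl⟩
    have hwp : ((s.drop i.toNat).take kI.toNat).Pairwise (· ≤ ·) :=
      List.Pairwise.sublist hwsub hsp
    have hws : PySem.List.sorted ((s.drop i.toNat).take kI.toNat) (fun y => y) false
        = (s.drop i.toNat).take kI.toNat :=
      PySem.List.sorted_eq_self_of_pairwise _ (fun y => y) hwp
    have hwC : ((s.drop i.toNat).take kI.toNat) ∈
        (pvCombos s kI.toNat).foldl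
          (fun cs c =>
            if cs.contains (PySem.List.sorted c (fun y => y) false) then cs
            else cs ++ [PySem.List.sorted c (fun y => y) false]) [] :=
      (mem_dedup_fold _ [] _).mpr (Or.inr ⟨_, hwmem, hws.symm⟩)
    have hwne : ((s.drop i.toNat).take kI.toNat) ≠ [] := by
      intro h
      rw [h] at hwl
      simp at hwl
      omega
    have hwget : ∀ (t : Nat) (ht : t < kI.toNat),
        ((s.drop i.toNat).take kI.toNat)[t]'(by rw [hwl]; exact ht) = s[i.toNat + t]'(by omega) := by
      intro t ht
      simp only [List.getElem_take, List.getElem_drop]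
    have hpaw : PySem.List.pyGetD ((s.drop i.toNat).take kI.toNat) (-1) 0
        - PySem.List.pyGetD ((s.drop i.toNat).take kI.toNat) 0 0 ≤ d := by
      have hlast : PySem.List.pyGetD ((s.drop i.toNat).take kI.toNat) (-1) 0
          = s[i.toNat + (kI.toNat - 1)]'(by omega) := by
        rw [PySem.List.pyGetD_neg_one _ _ hwne, List.getLast_eq_getElem]
        simp only [hwl]
        exact hwget (kI.toNat - 1) (by omega)
      have hfirst : PySem.List.pyGetD ((s.drop i.toNat).take kI.toNat) 0 0
          = s[i.toNat]'(by omega) := by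
        rw [PySem.List.pyGetD_eq_getElem _ 0 (by omega) (by rw [hwl]; omega)]
        simpa using hwget 0 hK1
      rw [hlast, hfirst]
      have e1 : PySem.List.pyGetD s (i + kI - 1) 0 = s[(i + kI - 1).toNat]'(by omega) :=
        PySem.List.pyGetD_eq_getElem s 0 (by omega) (by omega)
      have e2 : PySem.List.pyGetD s i 0 = s[i.toNat]'(by omega) :=
        PySem.List.pyGetD_eq_getElem s 0 (by omega) (by omega)
      rw [e1, e2] at hpb
      simpa only [show (i + kI - 1).toNat = i.toNat + (kI.toNat - 1) from by omega] using hpb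
    refine ⟨pvCalcAvg ((s.drop i.toNat).take kI.toNat), ?_, ?_⟩
    · simp only [List.mem_map, List.mem_filter, decide_eq_true_eq]
      exact ⟨_, ⟨hwC, hpaw⟩, rfl⟩
    · have hsl : PySem.List.slice s (some i) (some (i + kI)) = (s.drop i.toNat).take kI.toNat := by
        rw [show i = ((i.toNat : Nat) : Int) from hij.symm,
          show ((i.toNat : Nat) : Int) + kI = ((i.toNat + kI.toNat : Nat) : Int) from by
            push_cast; omega]
        rw [PySem.List.slice_natCast]
        congr 1
        omega
      rw [hsl]
      unfold pvCalcAvg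
      rw [show ((((s.drop i.toNat).take kI.toNat).length : Nat) : Int) = kI from by
        rw [hwl]; exact hKI]

-- ===== VERDICT (by name: the statement is the Claim_ definition above) =====
theorem solution_spec : Claim_equal_solution := by
  unfold Claim_equal_solution
  intro prices d k _ hpre
  simp only [Pre_solution] at hpre
  obtain ⟨hn, hrest⟩ := hpre
  have hlen : (PySem.List.sorted prices (fun y => y) false).length = prices.length :=
    PySem.List.length_sorted prices (fun y => y) false
  have hsp : (PySem.List.sorted prices (fun y => y) false).Pairwise (· ≤ ·) :=
    PySem.List.sorted_pairwise prices (fun y => y)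
  simp only [Spec_solution, solution, solution_alt]
  by_cases hc1 : PySem.List.pyGetD (PySem.List.sorted prices (fun y => y) false) (-1) 0
      - PySem.List.pyGetD (PySem.List.sorted prices (fun y => y) false) 0 0 ≤ d
  · simp only [if_pos hc1]
    unfold pvCalcAvg
    rw [hlen]
  · simp only [if_neg hc1]
    obtain ⟨h2n, hc2i, hki⟩ := hrest hc1
    by_cases hc2 : PySem.List.pyGetD (PySem.List.sorted prices (fun y => y) false) (-2) 0
        - PySem.List.pyGetD (PySem.List.sorted prices (fun y => y) false) 1 0 ≤ d
    · simp only [if_pos hc2]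
      have h3 : 3 ≤ prices.length := hc2i hc2
      unfold pvCalcAvg
      have hsl : (PySem.List.slice (PySem.List.sorted prices (fun y => y) false)
          (some 1) (some (-1))).length = prices.length - 2 := by
        rw [PySem.List.length_slice, PySem.List.clampIdx_neg_one]
        have h1 : PySem.List.clampIdx (PySem.List.sorted prices (fun y => y) false).length (1:Int)
            = min 1 (PySem.List.sorted prices (fun y => y) false).length := by
          exact_mod_cast PySem.List.clampIdx_natCast
            (PySem.List.sorted prices (fun y => y) false).length 1
        rw [h1, hlen]
        omega
      rw [hsl]
      congr 1
      omega
    · simp only [if_neg hc2]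
      have hk : 1 ≤ k := hki hc2
      have hE := fold_combos_eq_windows (PySem.List.sorted prices (fun y => y) false) d k hk hsp
      rw [hlen] at hE
      rw [hE]
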